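-- pv_equiv track=rewrite | github.com/DivyanshiChouksey/Data-Structure-Algorithm | 551.Disk Stacking.py | diskStacking
-- ===== SOURCE A (Python) =====
-- def diskStacking(disks):
--     disks.sort(key=lambda x:x[2])
--     height = [disk[2] for disk in disks]
--     seq = [None for disk in disks]
--     maxHeight = 0
--     for i in range(1,len(disks)):
--         for j in range(0,i):
--             if disks[j][0] < disks[i][0] and disks[j][1] < disks[i][1] and disks[j][2] < disks[i][2]:
--                 if height[i]<= disks[i][2]+height[j]:
--                     height[i] = disks[i][2]+height[j]
--                     seq[i] = j
--         if height[i]>= height[maxHeight]: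
--             maxHeight = i
--
--     return buildSeq(disks,seq,maxHeight)
--
-- def buildSeq(array , seq, currIdx):
--     sequence = []
--     while currIdx is not None:
--         sequence.append(array[currIdx])
--         currIdx = seq[currIdx]
--
--     return list(reversed(sequence))
-- ===== SOURCE B (Python) =====
-- def diskStacking(disks):
--     # Sort in place by height, like A (mutates the argument).
--     disks.sort(key=lambda x: x[2])
--     memo = {}
--
--     def stack(i):
--         # (height, full sequence) of the tallest stack topped by disks[i];
--         # ties broken toward the later predecessor, as in A.
--         if i not in memo:
--             h, s = disks[i][2], [disks[i]]
--             for j in range(i):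
--                 if disks[j][0] < disks[i][0] and disks[j][1] < disks[i][1] and disks[j][2] < disks[i][2]:
--                     hj, sj = stack(j)
--                     if h <= disks[i][2] + hj:
--                         h, s = disks[i][2] + hj, sj + [disks[i]]
--             memo[i] = (h, s)
--         return memo[i]
--
--     bh, bs = stack(0)
--     for i in range(1, len(disks)):
--         h, s = stack(i)
--         if h >= bh:
--             bh, bs = h, s
--     return bs
-- ===== Notes on version B (the rewrite author's own statement) =====
-- stated objective: alternative
-- what changed: B replaces A's table-filling double loop with predecessor pointers and the buildSeq pointer-chase by a memoized recursion best(i) that returns the (height, full stack sequence) pair topped by disk i directly, so no seq table and no reconstruction pass exist.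
import Mathlib
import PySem

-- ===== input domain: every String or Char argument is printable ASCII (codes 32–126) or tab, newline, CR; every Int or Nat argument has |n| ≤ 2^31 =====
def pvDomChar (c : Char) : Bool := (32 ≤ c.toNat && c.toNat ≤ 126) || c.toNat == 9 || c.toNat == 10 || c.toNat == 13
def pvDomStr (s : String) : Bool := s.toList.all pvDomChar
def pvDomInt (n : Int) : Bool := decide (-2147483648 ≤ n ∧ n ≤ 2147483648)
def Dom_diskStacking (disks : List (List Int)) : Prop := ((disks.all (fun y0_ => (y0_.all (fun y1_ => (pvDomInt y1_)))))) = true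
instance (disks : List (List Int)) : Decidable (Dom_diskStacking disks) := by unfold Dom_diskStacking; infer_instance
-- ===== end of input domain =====

-- B builds (height, full sequence) pairs by memoized recursion instead of A's pointer tables + buildSeq.
-- Both A and B sort the argument list in place in Python (same observable mutation); equivalence here is about the return value.

-- disks[i][k]; exact under Pre_ (index i is always < length, every disk has ≥ 3 entries)
def pvZ (ds : List (List Int)) (i k : Nat) : Int := (ds.getD i []).getD k 0

-- ===== PORT A =====
def buildSeqA (arr : List (List Int)) (seq : List (Option Nat)) : Nat → Option Nat → List (List Int) → List (List Int)
  | _, none, acc => acc.reverse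
  | 0, some _, acc => acc.reverse      -- fuel guard only; never reached on inputs in Pre_
  | fuel+1, some i, acc => buildSeqA arr seq fuel (seq.getD i none) (acc ++ [arr.getD i []])

def innerStepA (ds : List (List Int)) (i : Nat) (hs : List Int × List (Option Nat)) (j : Nat) :
    List Int × List (Option Nat) :=
  if pvZ ds j 0 < pvZ ds i 0 ∧ pvZ ds j 1 < pvZ ds i 1 ∧ pvZ ds j 2 < pvZ ds i 2 then
    if hs.1.getD i 0 ≤ pvZ ds i 2 + hs.1.getD j 0 then
      (hs.1.set i (pvZ ds i 2 + hs.1.getD j 0), hs.2.set i (some j))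
    else hs
  else hs

def outerStepA (ds : List (List Int)) (st : List Int × List (Option Nat) × Nat) (i : Nat) :
    List Int × List (Option Nat) × Nat :=
  let inner := (List.range i).foldl (innerStepA ds i) (st.1, st.2.1)
  (inner.1, inner.2, if inner.1.getD st.2.2 0 ≤ inner.1.getD i 0 then i else st.2.2)

def diskStacking (disks : List (List Int)) : List (List Int) :=
  let ds := PySem.List.sorted disks (fun d => d.getD 2 0) false
  let st := (List.range' 1 (ds.length - 1)).foldl (outerStepA ds)
      (ds.map (fun d => d.getD 2 0), ds.map (fun _ => (none : Option Nat)), 0)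
  buildSeqA ds st.2.1 ds.length (some st.2.2) []

-- ===== PORT B =====
def stackB (ds : List (List Int)) (i : Nat) : Int × List (List Int) :=
  (List.range i).attach.foldl
    (fun hs jj =>
      if pvZ ds jj.1 0 < pvZ ds i 0 ∧ pvZ ds jj.1 1 < pvZ ds i 1 ∧ pvZ ds jj.1 2 < pvZ ds i 2 then
        let b := stackB ds jj.1
        if hs.1 ≤ pvZ ds i 2 + b.1 then (pvZ ds i 2 + b.1, b.2 ++ [ds.getD i []]) else hs
      else hs)
    (pvZ ds i 2, [ds.getD i []])
termination_by i
decreasing_by exact List.mem_range.mp jj.2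

def diskStacking_alt (disks : List (List Int)) : List (List Int) :=
  let ds := PySem.List.sorted disks (fun d => d.getD 2 0) false
  let best := (List.range' 1 (ds.length - 1)).foldl
    (fun (b : Int × List (List Int)) i =>
      let c := stackB ds i
      if b.1 ≤ c.1 then c else b)
    (stackB ds 0)
  best.2

-- ===== PRECONDITION & SPEC =====
-- A raises IndexError on the empty list (buildSeq reads array[0]) and on any disk with fewer
-- than 3 entries (the sort key / comparisons read disk[2]); exactly those inputs are excluded.
def Pre_diskStacking (disks : List (List Int)) : Prop :=
  disks ≠ [] ∧ ∀ d ∈ disks, 3 ≤ d.length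
instance (disks : List (List Int)) : Decidable (Pre_diskStacking disks) := by
  unfold Pre_diskStacking; infer_instance
def pvWitness_diskStacking : List (List Int) := [[2, 2, 2], [1, 1, 1]]

def Spec_diskStacking (disks : List (List Int)) (out : List (List Int)) : Prop := out = diskStacking_alt disks
instance (disks : List (List Int)) (out : List (List Int)) : Decidable (Spec_diskStacking disks out) := by unfold Spec_diskStacking; infer_instance

-- ===== CLAIM (what is proved, stated in full; the proofs are below) =====
def Claim_equal_diskStacking : Prop := ∀ (disks : List (List Int)), Dom_diskStacking disks → Pre_diskStacking disks → Spec_diskStacking disks (diskStacking disks)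

-- ===== LEMMAS AND PROOFS =====

-- Functional characterisation of the DP: hpS ds i = (best height topped by disk i, chosen predecessor).
def hpS (ds : List (List Int)) (i : Nat) : Int × Option Nat :=
  (List.range i).attach.foldl
    (fun ab jj =>
      if pvZ ds jj.1 0 < pvZ ds i 0 ∧ pvZ ds jj.1 1 < pvZ ds i 1 ∧ pvZ ds jj.1 2 < pvZ ds i 2 then
        if ab.1 ≤ pvZ ds i 2 + (hpS ds jj.1).1 then (pvZ ds i 2 + (hpS ds jj.1).1, some jj.1) else ab
      else ab)
    (pvZ ds i 2, none)
termination_by i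
decreasing_by exact List.mem_range.mp jj.2

def hS (ds : List (List Int)) (i : Nat) : Int := (hpS ds i).1
def pS (ds : List (List Int)) (i : Nat) : Option Nat := (hpS ds i).2

def specStep (ds : List (List Int)) (i : Nat) (ab : Int × Option Nat) (j : Nat) : Int × Option Nat :=
  if pvZ ds j 0 < pvZ ds i 0 ∧ pvZ ds j 1 < pvZ ds i 1 ∧ pvZ ds j 2 < pvZ ds i 2 then
    if ab.1 ≤ pvZ ds i 2 + hS ds j then (pvZ ds i 2 + hS ds j, some j) else ab
  else ab

-- the stack sequence determined by the predecessor chain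
def chainB (ds : List (List Int)) (i : Nat) : List (List Int) :=
  match pS ds i with
  | none => [ds.getD i []]
  | some j => if hj : j < i then chainB ds j ++ [ds.getD i []] else [ds.getD i []]
termination_by i
decreasing_by exact hj

-- getD/set/map helper facts
lemma getD_set_ne {α : Type} (l : List α) (i j : Nat) (v d : α) (h : j ≠ i) :
    (l.set i v).getD j d = l.getD j d := by
  simp [List.getD_eq_getElem?_getD, List.getElem?_set_ne (Ne.symm h)]

lemma getD_set_self {α : Type} (l : List α) (i : Nat) (v d : α) (h : i < l.length) :
    (l.set i v).getD i d = v := by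
  simp [List.getD_eq_getElem?_getD, h]

lemma hpS_fold (ds : List (List Int)) (i : Nat) :
    hpS ds i = (List.range i).foldl
      (fun ab j =>
        if pvZ ds j 0 < pvZ ds i 0 ∧ pvZ ds j 1 < pvZ ds i 1 ∧ pvZ ds j 2 < pvZ ds i 2 then
          if ab.1 ≤ pvZ ds i 2 + (hpS ds j).1 then (pvZ ds i 2 + (hpS ds j).1, some j) else ab
        else ab)
      (pvZ ds i 2, none) := by
  rw [hpS]
  exact List.foldl_attach
    (f := fun ab j =>
      if pvZ ds j 0 < pvZ ds i 0 ∧ pvZ ds j 1 < pvZ ds i 1 ∧ pvZ ds j 2 < pvZ ds i 2 then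
        if ab.1 ≤ pvZ ds i 2 + (hpS ds j).1 then (pvZ ds i 2 + (hpS ds j).1, some j) else ab
      else ab)

lemma hpS_eq_fold (ds : List (List Int)) (i : Nat) :
    hpS ds i = (List.range i).foldl (specStep ds i) (pvZ ds i 2, none) := by
  rw [hpS_fold]
  rfl

lemma spec_fold_lt (ds : List (List Int)) (i : Nat) :
    ∀ L : List Nat, (∀ x ∈ L, x < i) → ∀ ab : Int × Option Nat,
      (∀ j, ab.2 = some j → j < i) →
      ∀ j, ((L.foldl (specStep ds i) ab).2 = some j → j < i) := by
  intro L
  induction L with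
  | nil => intro _ ab hab j h; exact hab j h
  | cons x t ih =>
    intro hL ab hab j
    simp only [List.foldl_cons]
    refine ih (fun y hy => hL y (List.mem_cons_of_mem _ hy)) _ ?_ j
    intro j' hj'
    unfold specStep at hj'
    split_ifs at hj' with h1 h2
    · exact (Option.some_inj.mp hj') ▸ hL x List.mem_cons_self
    · exact hab j' hj'
    · exact hab j' hj'

lemma pS_lt (ds : List (List Int)) (i j : Nat) (h : pS ds i = some j) : j < i := by
  rw [pS, hpS_eq_fold] at h
  exact spec_fold_lt ds i (List.range i) (fun x hx => List.mem_range.mp hx)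
    (pvZ ds i 2, none) (by simp) j h

lemma chainB_none {ds : List (List Int)} {i : Nat} (h : pS ds i = none) :
    chainB ds i = [ds.getD i []] := by
  rw [chainB.eq_def, h]

lemma chainB_some {ds : List (List Int)} {i j : Nat} (h : pS ds i = some j) :
    chainB ds i = chainB ds j ++ [ds.getD i []] := by
  rw [chainB.eq_def, h]
  simp [pS_lt ds i j h]

-- the sequence B carries for a given predecessor entry
def repI (ds : List (List Int)) (i : Nat) : Option Nat → List (List Int)
  | none => [ds.getD i []]
  | some j => chainB ds j ++ [ds.getD i []]

lemma stackB_fold (ds : List (List Int)) (i : Nat) :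
    stackB ds i = (List.range i).foldl
      (fun hs j =>
        if pvZ ds j 0 < pvZ ds i 0 ∧ pvZ ds j 1 < pvZ ds i 1 ∧ pvZ ds j 2 < pvZ ds i 2 then
          let c := stackB ds j
          if hs.1 ≤ pvZ ds i 2 + c.1 then (pvZ ds i 2 + c.1, c.2 ++ [ds.getD i []]) else hs
        else hs)
      (pvZ ds i 2, [ds.getD i []]) := by
  rw [stackB]
  exact List.foldl_attach
    (f := fun hs j =>
      if pvZ ds j 0 < pvZ ds i 0 ∧ pvZ ds j 1 < pvZ ds i 1 ∧ pvZ ds j 2 < pvZ ds i 2 then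
        let c := stackB ds j
        if hs.1 ≤ pvZ ds i 2 + c.1 then (pvZ ds i 2 + c.1, c.2 ++ [ds.getD i []]) else hs
      else hs)

lemma coupleB (ds : List (List Int)) (i : Nat)
    (IH : ∀ j, j < i → stackB ds j = (hS ds j, chainB ds j)) :
    ∀ L : List Nat, (∀ x ∈ L, x < i) → ∀ (a : Int) (b : Option Nat),
      L.foldl
        (fun hs j =>
          if pvZ ds j 0 < pvZ ds i 0 ∧ pvZ ds j 1 < pvZ ds i 1 ∧ pvZ ds j 2 < pvZ ds i 2 then
            let c := stackB ds j
            if hs.1 ≤ pvZ ds i 2 + c.1 then (pvZ ds i 2 + c.1, c.2 ++ [ds.getD i []]) else hs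
          else hs)
        (a, repI ds i b) =
      ((L.foldl (specStep ds i) (a, b)).1, repI ds i (L.foldl (specStep ds i) (a, b)).2) := by
  intro L
  induction L with
  | nil => intro _ a b; rfl
  | cons x t ih =>
    intro hL a b
    have hx : x < i := hL x List.mem_cons_self
    simp only [List.foldl_cons]
    have hstep :
        (if pvZ ds x 0 < pvZ ds i 0 ∧ pvZ ds x 1 < pvZ ds i 1 ∧ pvZ ds x 2 < pvZ ds i 2 then
            let c := stackB ds x
            if (a, repI ds i b).1 ≤ pvZ ds i 2 + c.1 then
              (pvZ ds i 2 + c.1, c.2 ++ [ds.getD i []]) else (a, repI ds i b)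
          else (a, repI ds i b)) =
        ((specStep ds i (a, b) x).1, repI ds i (specStep ds i (a, b) x).2) := by
      rw [IH x hx]
      unfold specStep
      simp only [repI]
      split_ifs <;> rfl
    rw [hstep]
    exact ih (fun y hy => hL y (List.mem_cons_of_mem _ hy)) _ _

lemma stackB_eq (ds : List (List Int)) (i : Nat) :
    stackB ds i = (hS ds i, chainB ds i) := by
  induction i using Nat.strong_induction_on with
  | _ i IH =>
    rw [stackB_fold]
    have := coupleB ds i IH (List.range i) (fun x hx => List.mem_range.mp hx)
      (pvZ ds i 2) none
    simp only [repI] at this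
    rw [this]
    have hfold : (List.range i).foldl (specStep ds i) (pvZ ds i 2, none) = hpS ds i :=
      (hpS_eq_fold ds i).symm
    rw [hfold]
    have h2 : (match pS ds i with
        | none => [ds.getD i []]
        | some j => chainB ds j ++ [ds.getD i []]) = chainB ds i := by
      rcases h : pS ds i with _ | j
      · simp [chainB_none h]
      · simp [chainB_some h]
    rw [show (hpS ds i).2 = pS ds i from rfl, h2]
    rfl

lemma innerA_fold (ds : List (List Int)) (i : Nat) :
    ∀ L : List Nat, (∀ x ∈ L, x < i) →
    ∀ (h : List Int) (s : List (Option Nat)), i < h.length → i < s.length →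
      (∀ j, j < i → h.getD j 0 = hS ds j) →
      (L.foldl (innerStepA ds i) (h, s)).1.length = h.length ∧
      (L.foldl (innerStepA ds i) (h, s)).2.length = s.length ∧
      (L.foldl (innerStepA ds i) (h, s)).1.getD i 0 =
        (L.foldl (specStep ds i) (h.getD i 0, s.getD i none)).1 ∧
      (L.foldl (innerStepA ds i) (h, s)).2.getD i none =
        (L.foldl (specStep ds i) (h.getD i 0, s.getD i none)).2 ∧
      (∀ j, j ≠ i → (L.foldl (innerStepA ds i) (h, s)).1.getD j 0 = h.getD j 0 ∧
        (L.foldl (innerStepA ds i) (h, s)).2.getD j none = s.getD j none) := by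
  intro L
  induction L with
  | nil => intro _ h s _ _ _; exact ⟨rfl, rfl, rfl, rfl, fun j _ => ⟨rfl, rfl⟩⟩
  | cons x t ih =>
    intro hL h s hih his hfin
    have hx : x < i := hL x List.mem_cons_self
    have hxne : x ≠ i := Nat.ne_of_lt hx
    simp only [List.foldl_cons]
    have hgx : h.getD x 0 = hS ds x := hfin x hx
    have hstep : innerStepA ds i (h, s) x =
        if pvZ ds x 0 < pvZ ds i 0 ∧ pvZ ds x 1 < pvZ ds i 1 ∧ pvZ ds x 2 < pvZ ds i 2 then
          if h.getD i 0 ≤ pvZ ds i 2 + hS ds x then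
            (h.set i (pvZ ds i 2 + hS ds x), s.set i (some x))
          else (h, s)
        else (h, s) := by
      unfold innerStepA
      rw [hgx]
    rw [hstep]
    by_cases hc : pvZ ds x 0 < pvZ ds i 0 ∧ pvZ ds x 1 < pvZ ds i 1 ∧ pvZ ds x 2 < pvZ ds i 2
    · rw [if_pos hc]
      by_cases hle : h.getD i 0 ≤ pvZ ds i 2 + hS ds x
      · rw [if_pos hle]
        have hspec : specStep ds i (h.getD i 0, s.getD i none) x =
            (pvZ ds i 2 + hS ds x, some x) := by
          unfold specStep; rw [if_pos hc, if_pos hle]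
        obtain ⟨l1, l2, e1, e2, eo⟩ := ih (fun y hy => hL y (List.mem_cons_of_mem _ hy))
          (h.set i (pvZ ds i 2 + hS ds x)) (s.set i (some x))
          (by simpa using hih) (by simpa using his)
          (fun j hj => by
            rw [getD_set_ne _ _ _ _ _ (Nat.ne_of_lt hj)]; exact hfin j hj)
        rw [getD_set_self _ _ _ _ hih, getD_set_self _ _ _ _ his] at e1 e2
        rw [hspec]
        refine ⟨by simpa using l1, by simpa using l2, e1, e2, ?_⟩
        intro j hj
        obtain ⟨o1, o2⟩ := eo j hj
        rw [getD_set_ne _ _ _ _ _ hj] at o1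
        rw [getD_set_ne _ _ _ _ _ hj] at o2
        exact ⟨o1, o2⟩
      · rw [if_neg hle]
        have hspec : specStep ds i (h.getD i 0, s.getD i none) x =
            (h.getD i 0, s.getD i none) := by
          unfold specStep; rw [if_pos hc, if_neg hle]
        rw [hspec]
        exact ih (fun y hy => hL y (List.mem_cons_of_mem _ hy)) h s hih his hfin
    · rw [if_neg hc]
      have hspec : specStep ds i (h.getD i 0, s.getD i none) x =
          (h.getD i 0, s.getD i none) := by
        unfold specStep; rw [if_neg hc]
      rw [hspec]
      exact ih (fun y hy => hL y (List.mem_cons_of_mem _ hy)) h s hih his hfin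

lemma hS_zero (ds : List (List Int)) : hS ds 0 = pvZ ds 0 2 := by
  rw [hS, hpS_eq_fold]; rfl

lemma pS_zero (ds : List (List Int)) : pS ds 0 = none := by
  rw [pS, hpS_eq_fold]; rfl

-- invariant for A's outer fold
def invA (ds : List (List Int)) (k : Nat) (st : List Int × List (Option Nat) × Nat) : Prop :=
  st.1.length = ds.length ∧ st.2.1.length = ds.length ∧
  (∀ j, j < ds.length → st.1.getD j 0 = if j ≤ k then hS ds j else pvZ ds j 2) ∧
  (∀ j, j < ds.length → st.2.1.getD j none = if j ≤ k then pS ds j else none) ∧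
  st.2.2 ≤ k ∧
  st.2.2 = (List.range' 1 k).foldl (fun m i => if hS ds m ≤ hS ds i then i else m) 0

lemma getD_map_z (ds : List (List Int)) (j : Nat) (hj : j < ds.length) :
    (ds.map (fun d => d.getD 2 0)).getD j 0 = pvZ ds j 2 := by
  simp [List.getD_eq_getElem?_getD, List.getElem?_eq_getElem hj, pvZ]

lemma outerA_inv (ds : List (List Int)) (hn : 0 < ds.length) :
    ∀ k, k ≤ ds.length - 1 →
      invA ds k ((List.range' 1 k).foldl (outerStepA ds)
        (ds.map (fun d => d.getD 2 0), ds.map (fun _ => (none : Option Nat)), 0)) := by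
  intro k
  induction k with
  | zero =>
    intro _
    simp only [List.range'_zero, List.foldl_nil]
    refine ⟨by simp, by simp, ?_, ?_, le_refl 0, rfl⟩
    · intro j hj
      rw [getD_map_z ds j hj]
      rcases Nat.eq_zero_or_pos j with h0 | h0
      · subst h0; simp [hS_zero]
      · rw [if_neg (by omega)]
    · intro j hj
      rcases Nat.eq_zero_or_pos j with h0 | h0
      · subst h0
        simp [List.getD_eq_getElem?_getD, List.getElem?_eq_getElem hj, pS_zero]
      · rw [if_neg (by omega)]
        simp [List.getD_eq_getElem?_getD, List.getElem?_eq_getElem hj]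
  | succ k ihk =>
    intro hk1
    have hk : k ≤ ds.length - 1 := by omega
    obtain ⟨l1, l2, ih, is, im, imv⟩ := ihk hk
    set st := (List.range' 1 k).foldl (outerStepA ds)
      (ds.map (fun d => d.getD 2 0), ds.map (fun _ => (none : Option Nat)), 0) with hst
    have hconc : List.range' 1 (k+1) = List.range' 1 k ++ [1+k] := by
      have := List.range'_concat (s := 1) (n := k) (step := 1)
      simpa using this
    rw [hconc, List.foldl_append, List.foldl_cons, List.foldl_nil, ← hst]
    set i := 1 + k with hi
    have hin : i < ds.length := by omega
    have hfin : ∀ j, j < i → st.1.getD j 0 = hS ds j := by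
      intro j hj
      rw [ih j (by omega), if_pos (by omega)]
    obtain ⟨r1, r2, e1, e2, eo⟩ := innerA_fold ds i (List.range i)
      (fun x hx => List.mem_range.mp hx) st.1 st.2.1
      (by omega) (by omega) hfin
    have hstart1 : st.1.getD i 0 = pvZ ds i 2 := by
      rw [ih i hin, if_neg (by omega)]
    have hstart2 : st.2.1.getD i none = none := by
      rw [is i hin, if_neg (by omega)]
    have hsp : (List.range i).foldl (specStep ds i) (st.1.getD i 0, st.2.1.getD i none) =
        (hS ds i, pS ds i) := by
      rw [hstart1, hstart2, ← hpS_eq_fold]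
      rfl
    rw [hsp] at e1 e2
    unfold outerStepA
    set inner := (List.range i).foldl (innerStepA ds i) (st.1, st.2.1) with hinner
    have hgm : inner.1.getD st.2.2 0 = hS ds st.2.2 := by
      rw [(eo st.2.2 (by omega)).1, ih st.2.2 (by omega), if_pos im]
    refine ⟨by rw [r1, l1], by rw [r2, l2], ?_, ?_, ?_, ?_⟩
    · intro j hj
      by_cases hji : j = i
      · subst hji; rw [e1, if_pos (by omega)]
      · rw [(eo j hji).1, ih j hj]
        have hjk : j ≤ k ↔ j ≤ k + 1 := by omega
        by_cases h : j ≤ k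
        · rw [if_pos h, if_pos (by omega)]
        · rw [if_neg h, if_neg (by omega)]
    · intro j hj
      by_cases hji : j = i
      · subst hji; rw [e2, if_pos (by omega)]
      · rw [(eo j hji).2, is j hj]
        by_cases h : j ≤ k
        · rw [if_pos h, if_pos (by omega)]
        · rw [if_neg h, if_neg (by omega)]
    · dsimp only
      split_ifs <;> omega
    · dsimp only
      rw [hconc, List.foldl_append, List.foldl_cons, List.foldl_nil, ← imv]
      rw [hgm, e1]

lemma bsel_fold (ds : List (List Int)) (L : List Nat) :
    ∀ m : Nat,
      L.foldl (fun (b : Int × List (List Int)) i =>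
          let c := stackB ds i
          if b.1 ≤ c.1 then c else b) (hS ds m, chainB ds m) =
      (hS ds (L.foldl (fun m i => if hS ds m ≤ hS ds i then i else m) m),
       chainB ds (L.foldl (fun m i => if hS ds m ≤ hS ds i then i else m) m)) := by
  induction L with
  | nil => intro m; rfl
  | cons x t ih =>
    intro m
    simp only [List.foldl_cons, stackB_eq ds x]
    by_cases h : hS ds m ≤ hS ds x
    · rw [if_pos h]
      simpa [h] using ih x
    · rw [if_neg h]
      simpa [h] using ih m

lemma build_eq (ds : List (List Int)) (s : List (Option Nat))
    (hs : ∀ j, j < ds.length → s.getD j none = pS ds j) :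
    ∀ k, k < ds.length → ∀ fuel, k < fuel → ∀ acc,
      buildSeqA ds s fuel (some k) acc = (acc ++ (chainB ds k).reverse).reverse := by
  intro k
  induction k using Nat.strong_induction_on with
  | _ k IH =>
    intro hk fuel hfuel acc
    obtain ⟨f, rfl⟩ : ∃ f, fuel = f + 1 := ⟨fuel - 1, by omega⟩
    rw [buildSeqA, hs k hk]
    rcases h : pS ds k with _ | j
    · rw [buildSeqA, chainB_none h]
      simp
    · have hj : j < k := pS_lt ds k j h
      rw [IH j hj (by omega) f (by omega) (acc ++ [ds.getD k []]), chainB_some h]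
      simp

lemma main_eq (ds : List (List Int)) (hn : 0 < ds.length) :
    (let st := (List.range' 1 (ds.length - 1)).foldl (outerStepA ds)
        (ds.map (fun d => d.getD 2 0), ds.map (fun _ => (none : Option Nat)), 0)
     buildSeqA ds st.2.1 ds.length (some st.2.2) []) =
    (let best := (List.range' 1 (ds.length - 1)).foldl
        (fun (b : Int × List (List Int)) i =>
          let c := stackB ds i
          if b.1 ≤ c.1 then c else b) (stackB ds 0)
     best.2) := by
  obtain ⟨l1, l2, ih, is, im, imv⟩ := outerA_inv ds hn (ds.length - 1) (le_refl _)
  set st := (List.range' 1 (ds.length - 1)).foldl (outerStepA ds)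
      (ds.map (fun d => d.getD 2 0), ds.map (fun _ => (none : Option Nat)), 0) with hst
  have hm : st.2.2 < ds.length := by omega
  have hsv : ∀ j, j < ds.length → st.2.1.getD j none = pS ds j := by
    intro j hj
    rw [is j hj, if_pos (by omega)]
  have hA : buildSeqA ds st.2.1 ds.length (some st.2.2) [] = chainB ds st.2.2 := by
    rw [build_eq ds st.2.1 hsv st.2.2 hm ds.length hm []]
    simp
  have hB : (List.range' 1 (ds.length - 1)).foldl
      (fun (b : Int × List (List Int)) i =>
        let c := stackB ds i
        if b.1 ≤ c.1 then c else b) (stackB ds 0) =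
      (hS ds st.2.2, chainB ds st.2.2) := by
    rw [stackB_eq ds 0, bsel_fold ds _ 0, ← imv]
  simp only []
  rw [hA, hB]

-- ===== VERDICT (by name: the statement is the Claim_ definition above) =====
theorem diskStacking_spec : Claim_equal_diskStacking := by
  intro disks _ hpre
  unfold Spec_diskStacking diskStacking diskStacking_alt
  have hn : 0 < (PySem.List.sorted disks (fun d => d.getD 2 0) false).length := by
    rw [PySem.List.length_sorted]
    cases disks with
    | nil => exact absurd rfl hpre.1
    | cons a t => simp
  simpa using main_eq _ hn
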